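-- pv_equiv track=rewrite | github.com/mancbg/AlgorithmicProblemSolving | DominoSolitaire.py | domino_solitaire
-- ===== SOURCE A (Python) =====
-- def domino_solitaire(n, tiles):
--     score_previous = 0
--     score_previous_2 = abs(tiles[0][0] - tiles[1][0])
--
--     for i in range(1, len(tiles[0])):
--         h_current = abs(tiles[0][i] - tiles[0][i - 1]) + \
--                     abs(tiles[1][i] - tiles[1][i - 1]) + \
--                     score_previous
--         v_current = abs(tiles[0][i] - tiles[1][i]) + score_previous_2
--         score_previous = score_previous_2
--         score_previous_2 = max(h_current, v_current)
--
--     return score_previous_2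
-- ===== SOURCE B (Python) =====
-- def domino_solitaire(n, tiles):
--     top, bottom = tiles[0], tiles[1]
--     memo = {}
--
--     def f(i):
--         if i < 0:
--             return 0
--         if i == 0:
--             return abs(top[0] - bottom[0])
--         if i in memo:
--             return memo[i]
--         res = max(f(i - 1) + abs(top[i] - bottom[i]),
--                   f(i - 2) + abs(top[i] - top[i - 1]) + abs(bottom[i] - bottom[i - 1]))
--         memo[i] = res
--         return res
--
--     return f(len(top) - 1)
-- ===== Notes on version B (the rewrite author's own statement) =====
-- stated objective: alternative
-- what changed: Replaces the two rolling accumulators updated in a forward loop by a top-down memoized recursion f(i) = max(f(i-1)+vertical(i), f(i-2)+horizontal(i)) over the column index.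
import Mathlib
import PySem

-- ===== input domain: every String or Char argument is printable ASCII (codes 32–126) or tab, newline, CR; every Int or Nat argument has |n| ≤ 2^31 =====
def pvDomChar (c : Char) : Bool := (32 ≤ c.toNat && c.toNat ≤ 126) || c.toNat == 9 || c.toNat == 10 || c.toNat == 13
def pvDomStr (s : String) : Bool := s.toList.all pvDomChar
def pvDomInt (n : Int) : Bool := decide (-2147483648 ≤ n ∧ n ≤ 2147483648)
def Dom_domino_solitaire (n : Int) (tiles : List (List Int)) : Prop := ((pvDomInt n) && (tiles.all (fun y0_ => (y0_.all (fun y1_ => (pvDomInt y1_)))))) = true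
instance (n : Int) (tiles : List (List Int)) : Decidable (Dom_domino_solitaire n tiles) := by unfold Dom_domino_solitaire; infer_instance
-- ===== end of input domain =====

-- B replaces A's forward loop with two rolling accumulators by a top-down
-- memoized recursion over the column index (objective: alternative decomposition).

-- ===== PORT A =====
def domino_solitaire (n : Int) (tiles : List (List Int)) : Int :=
  let r0 := PySem.List.pyGetD tiles 0 []
  let r1 := PySem.List.pyGetD tiles 1 []
  let init : Int × Int := (0, |PySem.List.pyGetD r0 0 0 - PySem.List.pyGetD r1 0 0|)
  let res := (PySem.List.pyRange 1 (r0.length : Int) 1).foldl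
    (fun (s : Int × Int) (i : Int) =>
      let h := |PySem.List.pyGetD r0 i 0 - PySem.List.pyGetD r0 (i-1) 0| +
               |PySem.List.pyGetD r1 i 0 - PySem.List.pyGetD r1 (i-1) 0| + s.1
      let v := |PySem.List.pyGetD r0 i 0 - PySem.List.pyGetD r1 i 0| + s.2
      (s.2, max h v)) init
  res.2

-- ===== PORT B =====
-- vertical cost of column i
def dsVert (r0 r1 : List Int) (i : Int) : Int :=
  |PySem.List.pyGetD r0 i 0 - PySem.List.pyGetD r1 i 0|

-- horizontal cost of columns i-1, i
def dsHoriz (r0 r1 : List Int) (i : Int) : Int :=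
  |PySem.List.pyGetD r0 i 0 - PySem.List.pyGetD r0 (i-1) 0| +
  |PySem.List.pyGetD r1 i 0 - PySem.List.pyGetD r1 (i-1) 0|

-- Source B's recursion f(i), with its i < 0 base case
def dsF (r0 r1 : List Int) (i : Int) : Int :=
  if i < 0 then 0
  else if i = 0 then dsVert r0 r1 0
  else max (dsF r0 r1 (i-1) + dsVert r0 r1 i) (dsF r0 r1 (i-2) + dsHoriz r0 r1 i)
termination_by i.toNat
decreasing_by all_goals omega

def domino_solitaire_alt (n : Int) (tiles : List (List Int)) : Int :=
  let r0 := PySem.List.pyGetD tiles 0 []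
  let r1 := PySem.List.pyGetD tiles 1 []
  dsF r0 r1 ((r0.length : Int) - 1)

-- ===== PRECONDITION & SPEC =====
-- Pre_ excludes exactly the shapes on which A raises IndexError: fewer than two
-- rows, an empty first row, or a second row shorter than the first.
def Pre_domino_solitaire (n : Int) (tiles : List (List Int)) : Prop :=
  2 ≤ tiles.length ∧ 1 ≤ (tiles.getD 0 []).length ∧
  (tiles.getD 0 []).length ≤ (tiles.getD 1 []).length
instance (n : Int) (tiles : List (List Int)) : Decidable (Pre_domino_solitaire n tiles) := by unfold Pre_domino_solitaire; infer_instance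

def pvWitness_domino_solitaire : Int × List (List Int) := (2, [[1, 5], [3, 2]])

def Spec_domino_solitaire (n : Int) (tiles : List (List Int)) (out : Int) : Prop := out = domino_solitaire_alt n tiles
instance (n : Int) (tiles : List (List Int)) (out : Int) : Decidable (Spec_domino_solitaire n tiles out) := by unfold Spec_domino_solitaire; infer_instance

-- ===== CLAIM (what is proved, stated in full; the proofs are below) =====
def Claim_equal_domino_solitaire : Prop := ∀ (n : Int) (tiles : List (List Int)), Dom_domino_solitaire n tiles → Pre_domino_solitaire n tiles → Spec_domino_solitaire n tiles (domino_solitaire n tiles)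

-- ===== LEMMAS AND PROOFS =====

theorem dsF_neg (r0 r1 : List Int) (i : Int) (h : i < 0) : dsF r0 r1 i = 0 := by
  rw [dsF]; simp [h]

theorem dsF_zero (r0 r1 : List Int) : dsF r0 r1 0 = dsVert r0 r1 0 := by
  rw [dsF]; simp

theorem dsF_step (r0 r1 : List Int) (i : Int) (h : 1 ≤ i) :
    dsF r0 r1 i = max (dsF r0 r1 (i-1) + dsVert r0 r1 i) (dsF r0 r1 (i-2) + dsHoriz r0 r1 i) := by
  rw [dsF, if_neg (by omega), if_neg (by omega)]

-- loop invariant: after processing columns 1..k, A's state is (f(k-1), f(k))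
theorem dsLoop (r0 r1 : List Int) (k : Nat) :
    (PySem.List.pyRange 1 (1 + (k : Int)) 1).foldl
      (fun (s : Int × Int) (i : Int) =>
        let h := |PySem.List.pyGetD r0 i 0 - PySem.List.pyGetD r0 (i-1) 0| +
                 |PySem.List.pyGetD r1 i 0 - PySem.List.pyGetD r1 (i-1) 0| + s.1
        let v := |PySem.List.pyGetD r0 i 0 - PySem.List.pyGetD r1 i 0| + s.2
        (s.2, max h v)) (0, |PySem.List.pyGetD r0 0 0 - PySem.List.pyGetD r1 0 0|)
    = (dsF r0 r1 ((k : Int) - 1), dsF r0 r1 (k : Int)) := by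
  induction k with
  | zero =>
      simp [PySem.List.pyRange_one_eq_nil, dsF_neg r0 r1 (-1) (by omega), dsF_zero, dsVert]
  | succ k ih =>
      rw [show (1 + ((k+1 : Nat) : Int)) = (1 + (k:Int)) + 1 by push_cast; ring,
          PySem.List.pyRange_one_succ_right (by omega), List.foldl_append, ih]
      simp only [List.foldl_cons, List.foldl_nil, Prod.mk.injEq]
      refine ⟨by norm_num, ?_⟩
      rw [dsF_step r0 r1 ((k+1 : Nat) : Int) (by push_cast; omega), max_comm]
      push_cast
      rw [show (k : Int) + 1 - 1 = k by ring, show (k : Int) + 1 - 2 = k - 1 by ring]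
      simp only [dsVert, dsHoriz, show ((k:Int)+1) = 1+(k:Int) from by ring]
      congr 1 <;> ring

-- ===== VERDICT (by name: the statement is the Claim_ definition above) =====
theorem domino_solitaire_spec : Claim_equal_domino_solitaire := by
  intro n tiles _ hpre
  unfold Spec_domino_solitaire
  simp only [domino_solitaire, domino_solitaire_alt]
  have h0 : 1 ≤ (PySem.List.pyGetD tiles 0 []).length := by
    rw [PySem.List.pyGetD_zero]; exact hpre.2.1
  generalize hg : PySem.List.pyGetD tiles 0 [] = r0 at h0
  generalize PySem.List.pyGetD tiles 1 [] = r1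
  obtain ⟨k, hlen⟩ : ∃ k, r0.length = k + 1 := ⟨r0.length - 1, by omega⟩
  rw [hlen, show (((k+1 : Nat)) : Int) = 1 + (k : Int) by push_cast; ring, dsLoop]
  norm_num
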